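-- pv_equiv track=rewrite | github.com/dlejay/vim | src/tables/generate_unicode_tables.py | make_intervals
-- ===== SOURCE A (Python) =====
-- def make_intervals(cps):
--     intervals = []
--     if not cps:
--         return intervals
--     start = prev = cps[0]
--     for cp in cps[1:]:
--         if cp == prev + 1:
--             prev = cp
--         else:
--             intervals.append((start, prev))
--             start = prev = cp
--     intervals.append((start, prev))
--     return intervals
-- ===== SOURCE B (Python) =====
-- def make_intervals(cps):
--     if not cps:
--         return []
--     breaks = [(a, b) for a, b in zip(cps, cps[1:]) if b != a + 1]
--     starts = [cps[0]] + [b for _, b in breaks]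
--     ends = [a for a, _ in breaks] + [cps[-1]]
--     return list(zip(starts, ends))
-- ===== Notes on version B (the rewrite author's own statement) =====
-- stated objective: alternative
-- what changed: Replaces A's single pass with a running (intervals, start, prev) accumulator by a two-phase computation: collect the adjacent pairs where a run breaks, build the starts and ends lists from them, and zip them into the intervals.
import Mathlib
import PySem

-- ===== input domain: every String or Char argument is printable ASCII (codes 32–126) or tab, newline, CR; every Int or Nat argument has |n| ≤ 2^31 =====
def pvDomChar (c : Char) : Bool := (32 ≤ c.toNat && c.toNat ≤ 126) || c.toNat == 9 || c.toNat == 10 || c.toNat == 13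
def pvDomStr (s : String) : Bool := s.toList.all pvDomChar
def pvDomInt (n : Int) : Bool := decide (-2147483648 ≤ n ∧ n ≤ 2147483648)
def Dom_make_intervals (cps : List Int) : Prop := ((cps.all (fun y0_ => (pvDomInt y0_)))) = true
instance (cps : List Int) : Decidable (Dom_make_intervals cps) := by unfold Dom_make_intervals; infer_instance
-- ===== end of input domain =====

-- B replaces A's running-accumulator pass by a two-phase build (break pairs, then
-- starts/ends zipped); objective: alternative decomposition, same O(n) cost.

-- ===== PORT A =====
-- A: one pass keeping (intervals, start, prev), appending an interval at each break.
def make_intervals (cps : List Int) : List (Int × Int) :=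
  match cps with
  | [] => []
  | c0 :: rest =>
    let s := rest.foldl
      (fun (st : List (Int × Int) × Int × Int) cp =>
        if cp = st.2.2 + 1 then (st.1, st.2.1, cp)
        else (st.1 ++ [(st.2.1, st.2.2)], cp, cp))
      ([], c0, c0)
    s.1 ++ [(s.2.1, s.2.2)]

-- ===== PORT B =====
-- B: the pairs zip(cps, cps[1:]) where a run breaks, then starts ∥ ends zipped.
def make_intervals_alt (cps : List Int) : List (Int × Int) :=
  match cps with
  | [] => []
  | c0 :: rest =>
    let breaks := ((c0 :: rest).zip rest).filter (fun p => decide (p.2 ≠ p.1 + 1))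
    let starts := c0 :: breaks.map Prod.snd
    -- cps[-1]: in range since cps ≠ [], so .getD 0 is never taken
    let ends := breaks.map Prod.fst ++ [(PySem.List.pyGet? (c0 :: rest) (-1)).getD 0]
    starts.zip ends

-- ===== PRECONDITION & SPEC =====
def Spec_make_intervals (cps : List Int) (out : List (Int × Int)) : Prop := out = make_intervals_alt cps
instance (cps : List Int) (out : List (Int × Int)) : Decidable (Spec_make_intervals cps out) := by unfold Spec_make_intervals; infer_instance

-- ===== CLAIM (what is proved, stated in full; the proofs are below) =====
def Claim_equal_make_intervals : Prop := ∀ (cps : List Int), Dom_make_intervals cps → Spec_make_intervals cps (make_intervals cps)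

-- ===== LEMMAS AND PROOFS =====

-- common recursive characterisation of the interval list
def runs (start prev : Int) : List Int → List (Int × Int)
  | [] => [(start, prev)]
  | cp :: rest => if cp = prev + 1 then runs start cp rest
                  else (start, prev) :: runs cp cp rest

theorem make_intervals_eq_runs (rest : List Int) :
    ∀ (acc : List (Int × Int)) (start prev : Int),
      (let s := rest.foldl
        (fun (st : List (Int × Int) × Int × Int) cp =>
          if cp = st.2.2 + 1 then (st.1, st.2.1, cp)
          else (st.1 ++ [(st.2.1, st.2.2)], cp, cp))
        (acc, start, prev)
       s.1 ++ [(s.2.1, s.2.2)]) = acc ++ runs start prev rest := by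
  induction rest with
  | nil => intro acc start prev; simp [runs]
  | cons cp rest ih =>
    intro acc start prev
    simp only [List.foldl_cons, runs]
    by_cases h : cp = prev + 1
    · rw [if_pos h, if_pos h]; exact ih acc start cp
    · rw [if_neg h, if_neg h]; simpa using ih (acc ++ [(start, prev)]) cp cp

theorem alt_eq_runs (rest : List Int) :
    ∀ (start prev : Int),
      ((start :: (((prev :: rest).zip rest).filter
          (fun p => decide (p.2 ≠ p.1 + 1))).map Prod.snd).zip
        ((((prev :: rest).zip rest).filter
          (fun p => decide (p.2 ≠ p.1 + 1))).map Prod.fst ++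
          [((prev :: rest).getLast?).getD 0]))
      = runs start prev rest := by
  induction rest with
  | nil => intro start prev; simp [runs]
  | cons cp rest ih =>
    intro start prev
    simp only [List.zip_cons_cons, runs]
    by_cases h : cp = prev + 1
    · have hlast : (prev :: cp :: rest).getLast? = (cp :: rest).getLast? := by
        simp [List.getLast?_cons_cons]
      rw [hlast]
      simpa [List.filter_cons, h] using ih start cp
    · have hlast : (prev :: cp :: rest).getLast? = (cp :: rest).getLast? := by
        simp [List.getLast?_cons_cons]
      rw [hlast]
      simpa [List.filter_cons, h] using ih cp cp

-- ===== VERDICT (by name: the statement is the Claim_ definition above) =====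
theorem make_intervals_spec : Claim_equal_make_intervals := by
  intro cps _
  unfold Spec_make_intervals make_intervals make_intervals_alt
  cases cps with
  | nil => rfl
  | cons c0 rest =>
    simp only [PySem.List.pyGet?_neg_one]
    rw [make_intervals_eq_runs rest [] c0 c0, alt_eq_runs rest c0 c0]
    simp
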